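-- pv_equiv track=rewrite | github.com/pypi-data/pypi-mirror-398 | packages/syncengine/syncengine-0.2.7-py3-none-any.whl/syncengine/ignore.py | _pattern_to_regex
-- ===== SOURCE A (Python) =====
-- def _pattern_to_regex(pattern: str) -> str:
--     """Convert a gitignore-style pattern to a regex.
--
--     Args:
--         pattern: Gitignore-style pattern with ** support
--
--     Returns:
--         Regex pattern string
--     """
--     # Escape special regex characters except our wildcards
--     result = ""
--     i = 0
--     while i < len(pattern):
--         c = pattern[i]
--         if c == "*":
--             if i + 1 < len(pattern) and pattern[i + 1] == "*":
--                 # ** matches any path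
--                 if i + 2 < len(pattern) and pattern[i + 2] == "/":
--                     # **/ at start or middle
--                     result += r"(?:.*/)?"
--                     i += 3
--                     continue
--                 else:
--                     # ** at end or alone
--                     result += r".*"
--                     i += 2
--                     continue
--             else:
--                 # Single * matches anything except /
--                 result += r"[^/]*"
--         elif c == "?":
--             result += r"[^/]"
--         elif c == "[":
--             # Character class - find the closing ]
--             j = i + 1
--             if j < len(pattern) and pattern[j] in "!^":
--                 j += 1
--             if j < len(pattern) and pattern[j] == "]":
--                 j += 1
--             while j < len(pattern) and pattern[j] != "]":
--                 j += 1
--             result += pattern[i : j + 1]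
--             i = j
--         elif c in r"\.^$+{}()|":
--             result += "\\" + c
--         else:
--             result += c
--         i += 1
--
--     return "^" + result + "$"
-- ===== SOURCE B (Python) =====
-- import re
--
-- # One master tokenizer: ordered alternatives, possessive quantifiers in the
-- # character-class alternative reproduce the deterministic left-to-right scan,
-- # and the `\[.*` fallback (with DOTALL) lets an unclosed '[' swallow the rest.
-- _TOKEN = re.compile(
--     r"\*\*/|\*\*|\*|\?|\[[!^]?+\]?+[^\]]*+\]|\[.*|[\\.^$+{}()|]|.",
--     re.DOTALL,
-- )
--
-- _SIMPLE = {"**/": "(?:.*/)?", "**": ".*", "*": "[^/]*", "?": "[^/]"}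
--
--
-- def _frag(m):
--     t = m.group()
--     if t in _SIMPLE:
--         return _SIMPLE[t]
--     if t[0] == "[":
--         return t
--     if t in "\\.^$+{}()|":
--         return "\\" + t
--     return t
--
--
-- def _pattern_to_regex(pattern: str) -> str:
--     return "^" + _TOKEN.sub(_frag, pattern) + "$"
-- ===== Notes on version B (the rewrite author's own statement) =====
-- stated objective: idiomatic
-- what changed: Replaced A's hand-rolled index-arithmetic while-loop scanner (with manual lookahead and an inner closing-bracket scan) by one precompiled master tokenizer regex with ordered alternatives (possessive quantifiers for the character-class scan, a DOTALL fallback for an unclosed '[') applied in a single re.sub with a token-to-fragment callback.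
import Mathlib
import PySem

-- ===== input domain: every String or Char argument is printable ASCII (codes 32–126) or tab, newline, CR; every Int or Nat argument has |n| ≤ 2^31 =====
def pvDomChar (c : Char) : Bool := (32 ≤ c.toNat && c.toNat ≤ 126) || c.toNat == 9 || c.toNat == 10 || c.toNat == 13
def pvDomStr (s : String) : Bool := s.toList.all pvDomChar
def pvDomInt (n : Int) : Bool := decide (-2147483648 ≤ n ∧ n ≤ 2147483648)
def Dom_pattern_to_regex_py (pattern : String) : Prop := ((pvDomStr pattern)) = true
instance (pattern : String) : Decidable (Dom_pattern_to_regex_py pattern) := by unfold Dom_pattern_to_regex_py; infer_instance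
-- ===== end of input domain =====

-- B re-implements the gitignore→regex translation with a single ordered-alternative
-- tokenizer (re.sub with a callback) instead of A's fused index-arithmetic while loop;
-- objective: idiomatic (same output, same cost).

-- ===== PORT A =====
-- A's inner "find the closing ]" while loop (`while j < len and pattern[j] != ']': j += 1`).
def pvFindClose (cs : List Char) (j : Nat) : Nat :=
  if h : j < cs.length then
    if cs[j] = ']' then j else pvFindClose cs (j + 1)
  else j
termination_by cs.length - j
decreasing_by exact Nat.sub_lt_sub_left h (Nat.lt_succ_self j)

theorem pvFindClose_ge (cs : List Char) (j : Nat) : j ≤ pvFindClose cs j := by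
  unfold pvFindClose
  split
  · split
    · exact le_refl j
    · have := pvFindClose_ge cs (j + 1); omega
  · exact le_refl j
termination_by cs.length - j

-- A's main while loop over the index i, accumulating `result`.
def pvLoopA (cs : List Char) (i : Nat) (res : List Char) : List Char :=
  if h : i < cs.length then
    let c := cs[i]
    if c = '*' then
      if cs[i+1]? = some '*' then
        if cs[i+2]? = some '/' then
          pvLoopA cs (i + 3) (res ++ ['(', '?', ':', '.', '*', '/', ')', '?'])
        else
          pvLoopA cs (i + 2) (res ++ ['.', '*'])
      else
        pvLoopA cs (i + 1) (res ++ ['[', '^', '/', ']', '*'])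
    else if c = '?' then
      pvLoopA cs (i + 1) (res ++ ['[', '^', '/', ']'])
    else if c = '[' then
      let j1 := i + 1
      let j2 := if cs[j1]? = some '!' ∨ cs[j1]? = some '^' then j1 + 1 else j1
      let j3 := if cs[j2]? = some ']' then j2 + 1 else j2
      let j := pvFindClose cs j3
      -- result += pattern[i : j+1]; i = j; i += 1
      pvLoopA cs (j + 1) (res ++ (cs.drop i).take (j + 1 - i))
    else if c ∈ ['\\', '.', '^', '$', '+', '{', '}', '(', ')', '|'] then
      pvLoopA cs (i + 1) (res ++ ['\\', c])
    else
      pvLoopA cs (i + 1) (res ++ [c])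
  else res
termination_by cs.length - i
decreasing_by
  · exact Nat.sub_lt_sub_left h (Nat.lt_succ_of_le (Nat.le_succ_of_le (Nat.le_succ i)))
  · exact Nat.sub_lt_sub_left h (Nat.lt_succ_of_le (Nat.le_succ i))
  · exact Nat.sub_lt_sub_left h (Nat.lt_succ_self i)
  · exact Nat.sub_lt_sub_left h (Nat.lt_succ_self i)
  · have key : ∀ k, i + 1 ≤ k → cs.length - (pvFindClose cs k + 1) < cs.length - i :=
      fun k hk => Nat.sub_lt_sub_left h (Nat.lt_succ_of_le
        (Nat.le_trans (Nat.le_trans (Nat.le_succ i) hk) (pvFindClose_ge cs k)))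
    apply key
    split <;> split <;>
      first
        | exact Nat.le_refl _
        | exact Nat.le_succ _
        | exact Nat.le_succ_of_le (Nat.le_succ _)
  · exact Nat.sub_lt_sub_left h (Nat.lt_succ_self i)
  · exact Nat.sub_lt_sub_left h (Nat.lt_succ_self i)

def pattern_to_regex_py (pattern : String) : String :=
  String.ofList ('^' :: pvLoopA pattern.toList 0 [] ++ ['$'])

-- ===== PORT B =====
-- Hand port of B's master regex (no regex engine in Lean): each function below follows
-- one alternative of the pattern r"\*\*/|\*\*|\*|\?|\[[!^]?+\]?+[^\]]*+\]|\[.*|[\\.^$+{}()|]|." ,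
-- tried in order at the current position; possessive quantifiers = no backtracking, so the
-- class alternative is exactly this deterministic scan.

-- The alternative \[[!^]?+\]?+[^\]]*+\] applied after the '[': each possessive piece
-- consumes greedily with no backtracking (k1 chars for [!^]?+, k2 for \]?+, then [^\]]*+),
-- and the whole alternative matches iff a closing ']' follows; exact for possessive semantics.
def pvClassScan (r : List Char) : Option (List Char × List Char) :=
  let k1 := if r.head? = some '!' ∨ r.head? = some '^' then 1 else 0
  let k2 := if (r.drop k1).head? = some ']' then 1 else 0
  let mid := (r.drop (k1 + k2)).takeWhile (· ≠ ']')
  let rest := (r.drop (k1 + k2)).dropWhile (· ≠ ']')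
  if rest = [] then none
  else some (r.take (k1 + k2) ++ mid ++ [']'], rest.tail)

theorem pvTailDropWhile_lt (q : Char → Bool) (n : Nat) (r : List Char) :
    (((r.drop n).dropWhile q).tail).length < r.length + 1 := by
  have h1 := List.length_dropWhile_le (p := q) (l := r.drop n)
  have h2 : (r.drop n).length = r.length - n := List.length_drop
  simp only [List.length_tail]
  omega

theorem pvClassScan_length (r t rest : List Char)
    (h : pvClassScan r = some (t, rest)) : rest.length < r.length + 1 := by
  unfold pvClassScan at h
  simp only [] at h
  split at h <;> split at h <;> split at h
  all_goals obtain ⟨-, rfl⟩ := h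
  all_goals exact pvTailDropWhile_lt _ _ _

-- Tokenize = iterate the master regex over the string (ordered alternatives at each position).
def pvTokenize : List Char → List (List Char)
  | [] => []
  | '*' :: '*' :: '/' :: r => ['*', '*', '/'] :: pvTokenize r
  | '*' :: '*' :: r => ['*', '*'] :: pvTokenize r
  | '*' :: r => ['*'] :: pvTokenize r
  | '?' :: r => ['?'] :: pvTokenize r
  | '[' :: r =>
    (match h : pvClassScan r with
     | some (t, rest) => ('[' :: t) :: pvTokenize rest
     | none => [('[' :: r)])          -- fallback \[.* (DOTALL): the rest is one token
  | c :: r => [c] :: pvTokenize r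
termination_by l => l.length
decreasing_by
  all_goals simp only [List.length_cons]
  all_goals first
    | exact pvClassScan_length _ _ _ h
    | exact Nat.lt_succ_self _
    | exact Nat.lt_succ_of_lt (Nat.lt_succ_self _)
    | exact Nat.lt_succ_of_lt (Nat.lt_succ_of_lt (Nat.lt_succ_self _))

def pvSpecials : List Char := ['\\', '.', '^', '$', '+', '{', '}', '(', ')', '|']

-- B's _frag callback (the `t in "\\.^$+{}()|"` substring test only ever sees
-- single-character tokens here, so membership is exact).
def pvFrag (t : List Char) : List Char :=
  if t = ['*', '*', '/'] then ['(', '?', ':', '.', '*', '/', ')', '?']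
  else if t = ['*', '*'] then ['.', '*']
  else if t = ['*'] then ['[', '^', '/', ']', '*']
  else if t = ['?'] then ['[', '^', '/', ']']
  else if t.head? = some '[' then t
  else match t with
    | [c] => if c ∈ pvSpecials then ['\\', c] else [c]
    | _ => t

def pattern_to_regex_py_alt (pattern : String) : String :=
  String.ofList ('^' :: ((pvTokenize pattern.toList).map pvFrag).flatten ++ ['$'])

-- ===== PRECONDITION & SPEC =====
def Spec_pattern_to_regex_py (pattern : String) (out : String) : Prop := out = pattern_to_regex_py_alt pattern
instance (pattern : String) (out : String) : Decidable (Spec_pattern_to_regex_py pattern out) := by unfold Spec_pattern_to_regex_py; infer_instance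

-- ===== CLAIM (what is proved, stated in full; the proofs are below) =====
def Claim_equal_pattern_to_regex_py : Prop := ∀ (pattern : String), Dom_pattern_to_regex_py pattern → Spec_pattern_to_regex_py pattern (pattern_to_regex_py pattern)

-- ===== LEMMAS AND PROOFS =====

theorem tok_nil : pvTokenize [] = [] := by simp [pvTokenize]

theorem tok_sss (r : List Char) :
    pvTokenize ('*' :: '*' :: '/' :: r) = ['*', '*', '/'] :: pvTokenize r := by
  simp [pvTokenize]

theorem tok_ss (r : List Char) (h : r.head? ≠ some '/') :
    pvTokenize ('*' :: '*' :: r) = ['*', '*'] :: pvTokenize r := by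
  cases r with
  | nil => simp [pvTokenize]
  | cons c r =>
    simp only [List.head?_cons, ne_eq, Option.some.injEq] at h
    simp [pvTokenize, h]

theorem tok_star (r : List Char) (h : r.head? ≠ some '*') :
    pvTokenize ('*' :: r) = ['*'] :: pvTokenize r := by
  cases r with
  | nil => simp [pvTokenize]
  | cons c r =>
    simp only [List.head?_cons, ne_eq, Option.some.injEq] at h
    simp [pvTokenize, h]

theorem tok_q (r : List Char) : pvTokenize ('?' :: r) = ['?'] :: pvTokenize r := by
  simp [pvTokenize]

theorem tok_lb_some (r t rest : List Char) (h : pvClassScan r = some (t, rest)) :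
    pvTokenize ('[' :: r) = ('[' :: t) :: pvTokenize rest := by
  rw [pvTokenize.eq_def]
  split
  all_goals try (exfalso; simp_all; done)
  all_goals rename_i i0 heq
  all_goals injection heq with h1 h2
  all_goals first
    | exact absurd h1.symm i0
    | (subst h2; split <;> simp_all)

theorem tok_lb_none (r : List Char) (h : pvClassScan r = none) :
    pvTokenize ('[' :: r) = [('[' :: r)] := by
  rw [pvTokenize.eq_def]
  split
  all_goals try (exfalso; simp_all; done)
  all_goals rename_i i0 heq
  all_goals injection heq with h1 h2
  all_goals first
    | exact absurd h1.symm i0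
    | (subst h2; split <;> simp_all)

theorem tok_other (c : Char) (r : List Char) (h1 : c ≠ '*') (h2 : c ≠ '?') (h3 : c ≠ '[') :
    pvTokenize (c :: r) = [c] :: pvTokenize r := by
  rw [pvTokenize.eq_def]
  split
  all_goals simp_all

theorem pvFindClose_eq (cs : List Char) (j : Nat) :
    pvFindClose cs j = j + ((cs.drop j).takeWhile (· ≠ ']')).length := by
  unfold pvFindClose
  split
  · rename_i h
    have hd : cs.drop j = cs[j] :: cs.drop (j + 1) := List.drop_eq_getElem_cons h
    split
    · rename_i he
      rw [hd, List.takeWhile_cons, if_neg (by simp [he])]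
      simp
    · rename_i he
      rw [pvFindClose_eq cs (j + 1), hd, List.takeWhile_cons, if_pos (by simp [he]),
        List.length_cons]
      omega
  · rename_i h
    rw [List.drop_eq_nil_of_le (by omega)]
    simp
termination_by cs.length - j

theorem dropWhile_head_false {p : Char → Bool} {l : List Char} {d : Char} {tl : List Char}
    (h : l.dropWhile p = d :: tl) : p d = false := by
  have w : l.dropWhile p ≠ [] := by simp [h]
  have hh := List.head_dropWhile_not p w
  simp [h] at hh
  exact hh

-- The '[' branch, for an arbitrary scan end m (= i+1+k1+k2), given what pvClassScan returns.
theorem class_core (cs : List Char) (i m : Nat) (res : List Char)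
    (hlt : i < cs.length) (hc : cs[i]'hlt = '[') (him : i + 1 ≤ m) (hm : m ≤ cs.length)
    (hscan : pvClassScan (cs.drop (i+1)) =
       (if (cs.drop m).dropWhile (· ≠ ']') = [] then none
        else some ((cs.drop (i+1)).take (m - (i+1)) ++ (cs.drop m).takeWhile (· ≠ ']') ++ [']'],
                   ((cs.drop m).dropWhile (· ≠ ']')).tail)))
    (IH : ∀ (i' : Nat) (res' : List Char), i < i' →
        pvLoopA cs i' res' = res' ++ (List.map pvFrag (pvTokenize (cs.drop i'))).flatten) :
    pvLoopA cs (pvFindClose cs m + 1) (res ++ (cs.drop i).take (pvFindClose cs m + 1 - i))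
      = res ++ (List.map pvFrag (pvTokenize (cs.drop i))).flatten := by
  have hdi : cs.drop i = cs[i]'hlt :: cs.drop (i + 1) := List.drop_eq_getElem_cons hlt
  have hfc : pvFindClose cs m = m + ((cs.drop m).takeWhile (· ≠ ']')).length := pvFindClose_eq cs m
  by_cases hre : (cs.drop m).dropWhile (· ≠ ']') = []
  · rw [if_pos hre] at hscan
    have hmidall : (cs.drop m).takeWhile (· ≠ ']') = cs.drop m := by
      have h0 := List.takeWhile_append_dropWhile (p := (· ≠ ']')) (l := cs.drop m)
      rw [hre, List.append_nil] at h0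
      exact h0
    have hjlen : pvFindClose cs m = cs.length := by
      rw [hfc, hmidall, List.length_drop]; omega
    rw [hjlen]
    rw [IH (cs.length + 1) _ (by omega)]
    rw [List.take_of_length_le (l := cs.drop i) (by rw [List.length_drop]; omega)]
    rw [List.drop_eq_nil_of_le (i := cs.length + 1) (by omega), tok_nil]
    rw [hdi, hc, tok_lb_none _ hscan]
    simp [pvFrag]
  · rw [if_neg hre] at hscan
    obtain ⟨d, tl, hdt⟩ : ∃ d tl, (cs.drop m).dropWhile (· ≠ ']') = d :: tl := by
      rcases h' : (cs.drop m).dropWhile (· ≠ ']') with _ | ⟨d, tl⟩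
      · exact absurd h' hre
      · exact ⟨d, tl, rfl⟩
    have hd : d = ']' := by simpa using dropWhile_head_false hdt
    subst hd
    rw [hdt] at hscan
    simp only [List.tail_cons] at hscan
    have hsplit : cs.drop m = (cs.drop m).takeWhile (· ≠ ']') ++ (']' :: tl) := by
      conv_lhs => rw [← List.takeWhile_append_dropWhile (p := (· ≠ ']')) (l := cs.drop m)]
      rw [hdt]
    have hrdecomp : cs.drop (i+1) = (cs.drop (i+1)).take (m - (i+1)) ++ cs.drop m := by
      conv_lhs => rw [← List.take_append_drop (m - (i+1)) (cs.drop (i+1))]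
      rw [List.drop_drop]
      have e : i + 1 + (m - (i+1)) = m := by omega
      rw [e]
    have htklen : ((cs.drop (i+1)).take (m - (i+1))).length = m - (i+1) := by
      rw [List.length_take, List.length_drop]; omega
    have hmidlen : ((cs.drop m).takeWhile (· ≠ ']')).length ≤ cs.length - m := by
      have h1 := congrArg List.length hsplit
      rw [List.length_drop, List.length_append, List.length_cons] at h1; omega
    have hfront : cs.drop i =
        ('[' :: ((cs.drop (i+1)).take (m - (i+1)) ++ (cs.drop m).takeWhile (· ≠ ']') ++ [']'])) ++ tl := by
      rw [hdi, hc]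
      conv_lhs => rw [hrdecomp, hsplit]
      simp [List.append_assoc]
    rw [hfc]
    conv_lhs => rw [hfront]
    rw [List.take_left' (by simp [List.length_append, htklen]; omega)]
    rw [IH (m + ((cs.drop m).takeWhile (· ≠ ']')).length + 1) _ (by omega)]
    have hdroptl : cs.drop (m + ((cs.drop m).takeWhile (· ≠ ']')).length + 1) = tl := by
      have e : cs.drop (m + ((cs.drop m).takeWhile (· ≠ ']')).length + 1)
          = (cs.drop i).drop (m + ((cs.drop m).takeWhile (· ≠ ']')).length + 1 - i) := by
        rw [List.drop_drop]
        congr 1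
        omega
      rw [e, hfront, List.drop_left' (by simp [List.length_append, htklen]; omega)]
    rw [hdroptl]
    rw [hdi, hc, tok_lb_some _ _ _ hscan]
    simp [pvFrag, List.append_assoc]

theorem pvLoopA_eq (cs : List Char) (i : Nat) (res : List Char) :
    pvLoopA cs i res = res ++ (List.map pvFrag (pvTokenize (cs.drop i))).flatten := by
  rw [pvLoopA.eq_def]
  by_cases hlt : i < cs.length
  · rw [dif_pos hlt]
    dsimp only
    have hdi : cs.drop i = cs[i]'hlt :: cs.drop (i + 1) := List.drop_eq_getElem_cons hlt
    by_cases h1 : cs[i]'hlt = '*'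
    · rw [if_pos h1]
      by_cases h2 : cs[i+1]? = some '*'
      · rw [if_pos h2]
        obtain ⟨hb2, he2⟩ := List.getElem?_eq_some_iff.mp h2
        have hd1 : cs.drop (i+1) = cs[i+1] :: cs.drop (i+2) := List.drop_eq_getElem_cons hb2
        by_cases h3 : cs[i+2]? = some '/'
        · rw [if_pos h3]
          obtain ⟨hb3, he3⟩ := List.getElem?_eq_some_iff.mp h3
          have hd2 : cs.drop (i+2) = cs[i+2] :: cs.drop (i+3) := List.drop_eq_getElem_cons hb3
          rw [pvLoopA_eq cs (i+3)]
          rw [hdi, h1, hd1, he2, hd2, he3, tok_sss]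
          simp [pvFrag, List.append_assoc]
        · rw [if_neg h3]
          rw [pvLoopA_eq cs (i+2)]
          have hh : (cs.drop (i+2)).head? ≠ some '/' := by rw [List.head?_drop]; exact h3
          rw [hdi, h1, hd1, he2, tok_ss _ hh]
          simp [pvFrag, List.append_assoc]
      · rw [if_neg h2]
        rw [pvLoopA_eq cs (i+1)]
        have hh : (cs.drop (i+1)).head? ≠ some '*' := by rw [List.head?_drop]; exact h2
        rw [hdi, h1, tok_star _ hh]
        simp [pvFrag, List.append_assoc]
    · rw [if_neg h1]
      by_cases hq : cs[i]'hlt = '?'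
      · rw [if_pos hq]
        rw [pvLoopA_eq cs (i+1)]
        rw [hdi, hq, tok_q]
        simp [pvFrag, List.append_assoc]
      · rw [if_neg hq]
        by_cases hlb : cs[i]'hlt = '['
        · rw [if_pos hlb]
          by_cases hP : cs[i+1]? = some '!' ∨ cs[i+1]? = some '^'
          · rw [if_pos hP]
            have hP' : (cs.drop (i+1)).head? = some '!' ∨ (cs.drop (i+1)).head? = some '^' := by
              rw [List.head?_drop]; exact hP
            by_cases hQ : cs[i+1+1]? = some ']'
            · rw [if_pos hQ]
              have e1 : (cs.drop (i+1)).drop 1 = cs.drop (i+1+1) := List.drop_drop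
              have hQ' : ((cs.drop (i+1)).drop 1).head? = some ']' := by
                rw [e1, List.head?_drop]; exact hQ
              obtain ⟨hbq, -⟩ := List.getElem?_eq_some_iff.mp hQ
              refine class_core cs i (i+1+1+1) res hlt hlb (by omega) (by omega) ?_
                (fun i' res' hii => pvLoopA_eq cs i' res')
              unfold pvClassScan
              simp only []
              rw [if_pos hP', if_pos hQ']
              have e2 : (cs.drop (i+1)).drop (1+1) = cs.drop (i+1+1+1) := by
                rw [List.drop_drop]
              have e3 : (1+1 : Nat) = i+1+1+1 - (i+1) := by omega
              rw [e2, e3]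
            · rw [if_neg hQ]
              have e1 : (cs.drop (i+1)).drop 1 = cs.drop (i+1+1) := List.drop_drop
              have hQ' : ¬ ((cs.drop (i+1)).drop 1).head? = some ']' := by
                rw [e1, List.head?_drop]; exact hQ
              have hb1 : i + 1 < cs.length := by
                rcases hP with h | h
                · exact (List.getElem?_eq_some_iff.mp h).1
                · exact (List.getElem?_eq_some_iff.mp h).1
              refine class_core cs i (i+1+1) res hlt hlb (by omega) (by omega) ?_
                (fun i' res' hii => pvLoopA_eq cs i' res')
              unfold pvClassScan
              simp only []
              rw [if_pos hP', if_neg hQ']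
              have e2 : (cs.drop (i+1)).drop (1+0) = cs.drop (i+1+1) := by
                rw [List.drop_drop]
              have e3 : (1+0 : Nat) = i+1+1 - (i+1) := by omega
              rw [e2, e3]
          · rw [if_neg hP]
            have hP' : ¬ ((cs.drop (i+1)).head? = some '!' ∨ (cs.drop (i+1)).head? = some '^') := by
              rw [List.head?_drop]; exact hP
            by_cases hQ : cs[i+1]? = some ']'
            · rw [if_pos hQ]
              have hQ' : ((cs.drop (i+1)).drop 0).head? = some ']' := by
                rw [List.drop_zero, List.head?_drop]; exact hQ
              obtain ⟨hbq, -⟩ := List.getElem?_eq_some_iff.mp hQ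
              refine class_core cs i (i+1+1) res hlt hlb (by omega) (by omega) ?_
                (fun i' res' hii => pvLoopA_eq cs i' res')
              unfold pvClassScan
              simp only []
              rw [if_neg hP', if_pos hQ']
              have e2 : (cs.drop (i+1)).drop (0+1) = cs.drop (i+1+1) := by
                rw [List.drop_drop]
              have e3 : (0+1 : Nat) = i+1+1 - (i+1) := by omega
              rw [e2, e3]
            · rw [if_neg hQ]
              have hQ' : ¬ ((cs.drop (i+1)).drop 0).head? = some ']' := by
                rw [List.drop_zero, List.head?_drop]; exact hQ
              refine class_core cs i (i+1) res hlt hlb (by omega) (by omega) ?_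
                (fun i' res' hii => pvLoopA_eq cs i' res')
              unfold pvClassScan
              simp only []
              rw [if_neg hP', if_neg hQ']
              have e2 : (cs.drop (i+1)).drop (0+0) = cs.drop (i+1) := by
                rw [List.drop_drop]
              have e3 : (0+0 : Nat) = i+1 - (i+1) := by omega
              rw [e2, e3]
        · rw [if_neg hlb]
          by_cases hsp : cs[i]'hlt ∈ ['\\', '.', '^', '$', '+', '{', '}', '(', ')', '|']
          · rw [if_pos hsp]
            rw [pvLoopA_eq cs (i+1)]
            rw [hdi, tok_other _ _ h1 hq hlb]
            simp [pvFrag, pvSpecials, h1, hq, hlb, hsp, List.append_assoc]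
          · rw [if_neg hsp]
            rw [pvLoopA_eq cs (i+1)]
            rw [hdi, tok_other _ _ h1 hq hlb]
            simp only [List.mem_cons, List.not_mem_nil, or_false] at hsp
            simp [pvFrag, pvSpecials, h1, hq, hlb, hsp, List.append_assoc]
  · rw [dif_neg hlt]
    rw [List.drop_eq_nil_of_le (by omega), tok_nil]
    simp
termination_by cs.length - i
decreasing_by all_goals omega

-- ===== VERDICT (by name: the statement is the Claim_ definition above) =====
theorem pattern_to_regex_py_spec : Claim_equal_pattern_to_regex_py := by
  intro pattern _
  unfold Spec_pattern_to_regex_py pattern_to_regex_py pattern_to_regex_py_alt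
  rw [pvLoopA_eq]
  simp
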